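-- pv_equiv track=rewrite | github.com/LeadFreeCandy/democracy-bot | visualize_condorcet.py | compute_ranked_pairs
-- ===== SOURCE A (Python) =====
-- from collections import defaultdict
--
-- def compute_ranked_pairs(movie_ids, movie_titles, matrix):
--     """Compute final ranking using Ranked Pairs (Tideman) method."""
--     n = len(movie_ids)
--
--     # Collect pairs with margins
--     pairs = []
--     for i in range(n):
--         for j in range(i + 1, n):
--             votes_i = matrix[i][j]
--             votes_j = matrix[j][i]
--             if votes_i > votes_j:
--                 pairs.append((i, j, votes_i - votes_j, votes_i))
--             elif votes_j > votes_i: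
--                 pairs.append((j, i, votes_j - votes_i, votes_j))
--             # If tie, no pair added
--
--     # Sort by margin (highest first), then by total votes as tiebreaker
--     pairs.sort(key=lambda x: (-x[2], -x[3]))
--
--     # Lock pairs without creating cycles
--     locked = defaultdict(set)
--
--     def would_create_cycle(winner, loser):
--         visited = set()
--         stack = [loser]
--         while stack:
--             current = stack.pop()
--             if current == winner:
--                 return True
--             if current in visited:
--                 continue
--             visited.add(current)
--             stack.extend(locked.get(current, []))
--         return False
--
--     for winner, loser, margin, _ in pairs:
--         if not would_create_cycle(winner, loser):
--             locked[winner].add(loser)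
--
--     # Topological sort for final ranking
--     in_degree = {i: 0 for i in range(n)}
--     for winner, losers in locked.items():
--         for loser in losers:
--             in_degree[loser] += 1
--
--     ranking = []
--     remaining = set(range(n))
--
--     while remaining:
--         sources = [i for i in remaining if in_degree[i] == 0]
--         if not sources:
--             # Add remaining alphabetically
--             remaining_sorted = sorted(remaining, key=lambda i: movie_titles[i])
--             ranking.extend(remaining_sorted)
--             break
--
--         # Sort sources alphabetically for deterministic ordering
--         sources.sort(key=lambda i: movie_titles[i])
--         for s in sources:
--             ranking.append(s)
--             remaining.discard(s)
--             for neighbor in locked.get(s, []):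
--                 in_degree[neighbor] -= 1
--
--     return ranking, locked
-- ===== SOURCE B (Python) =====
-- def _pair(i, j, vi, vj):
--     """Directed pair for one matchup, as a (possibly empty) list."""
--     if vi > vj:
--         return [(i, j, vi - vj, vi)]
--     if vj > vi:
--         return [(j, i, vj - vi, vj)]
--     return []
--
--
-- def compute_ranked_pairs(movie_ids, movie_titles, matrix):
--     """Compute final ranking using Ranked Pairs (Tideman) method."""
--     n = len(movie_ids)
--
--     # Collect pairs with margins (flat comprehension instead of nested append loops)
--     pairs = [p for i in range(n) for j in range(i + 1, n)
--              for p in _pair(i, j, matrix[i][j], matrix[j][i])]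
--
--     # Sort by margin (highest first), then by total votes as tiebreaker
--     pairs.sort(key=lambda x: (-x[2], -x[3]))
--
--     # Lock pairs, maintaining reach[x] = the set of nodes reachable from x
--     # through locked edges (including x itself).  A pair (winner, loser)
--     # would create a cycle exactly when winner is already reachable from
--     # loser, so no per-pair graph traversal is needed.
--     locked = {}
--     reach = [{i} for i in range(n)]
--     for winner, loser, margin, _ in pairs:
--         if winner not in reach[loser]:
--             locked.setdefault(winner, set()).add(loser)
--             gained = reach[loser]
--             reach = [r | gained if winner in r else r for r in reach]
--
--     # Topological sort by rounds: the in-degrees of the remaining nodes are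
--     # recomputed from the locked edges each round (no maintained in_degree
--     # dict, no per-source decrement); remaining is an ordered list.
--     ranking = []
--     remaining = list(range(n))
--     while remaining:
--         sources = sorted(
--             (i for i in remaining
--              if sum(1 for w in remaining if i in locked.get(w, ())) == 0),
--             key=lambda i: movie_titles[i])
--         if not sources:
--             ranking += sorted(remaining, key=lambda i: movie_titles[i])
--             break
--         ranking += sources
--         remaining = [i for i in remaining if i not in sources]
--
--     return ranking, locked
-- ===== Notes on version B (the rewrite author's own statement) =====
-- stated objective: alternative
-- what changed: pair collection becomes a flat comprehension, the per-pair DFS cycle test is replaced by an incrementally maintained reachability closure reach[x], and the Kahn topological sort recomputes in-degrees of the remaining nodes from the locked edges each round over an ordered list instead of maintaining an in_degree dict with per-source decrements over a set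
import Mathlib
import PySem

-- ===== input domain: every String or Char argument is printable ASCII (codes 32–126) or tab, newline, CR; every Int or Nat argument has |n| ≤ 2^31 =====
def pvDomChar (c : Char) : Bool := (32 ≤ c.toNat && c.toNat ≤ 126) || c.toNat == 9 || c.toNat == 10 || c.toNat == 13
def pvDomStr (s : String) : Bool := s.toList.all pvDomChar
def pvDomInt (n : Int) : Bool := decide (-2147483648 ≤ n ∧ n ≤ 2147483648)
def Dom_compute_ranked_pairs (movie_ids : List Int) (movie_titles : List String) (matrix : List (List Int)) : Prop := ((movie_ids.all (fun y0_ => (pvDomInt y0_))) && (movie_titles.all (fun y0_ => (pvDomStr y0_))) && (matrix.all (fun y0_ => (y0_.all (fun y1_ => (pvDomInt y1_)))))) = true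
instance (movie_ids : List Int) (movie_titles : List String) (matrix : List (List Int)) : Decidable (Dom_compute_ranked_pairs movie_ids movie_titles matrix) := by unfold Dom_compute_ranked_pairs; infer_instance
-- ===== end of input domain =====

-- B re-implements every stage differently: pair collection as a flat comprehension
-- (flatMap) instead of nested append loops, an incrementally maintained reachability
-- closure instead of A's per-pair DFS cycle test, and a round-based topological sort
-- that recomputes in-degrees of the remaining nodes from the locked edges each round
-- over an ordered list, instead of A's maintained in_degree dict with per-source
-- decrements over a set.

-- ===== PORT A =====
-- the nested 'for i / for j in range(i+1, n)' pair-collection loop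
def pvCollectPairs (n : Int) (matrix : List (List Int)) : List (Int × Int × Int × Int) :=
  (PySem.List.pyRange 0 n 1).foldl (fun pairs i =>
    (PySem.List.pyRange (i + 1) n 1).foldl (fun pairs j =>
      -- matrix[i][j] / matrix[j][i]: in range under Pre_, the getD defaults are unreachable
      let votes_i := PySem.List.pyGetD (PySem.List.pyGetD matrix i []) j 0
      let votes_j := PySem.List.pyGetD (PySem.List.pyGetD matrix j []) i 0
      if votes_j < votes_i then pairs ++ [(i, j, votes_i - votes_j, votes_i)]
      else if votes_i < votes_j then pairs ++ [(j, i, votes_j - votes_i, votes_j)]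
      else pairs) pairs) []

-- one 's' of the 'for s in sources' body: append to ranking, discard from remaining,
-- decrement in_degree of the locked neighbours (key always present under Pre_)
def pvKahnStep (locked : PySem.Dict Int (PySem.Set Int))
    (st : List Int × PySem.Set Int × PySem.Dict Int Int) (s : Int) :
    List Int × PySem.Set Int × PySem.Dict Int Int :=
  (st.1 ++ [s], PySem.Set.discard st.2.1 s,
    (locked.getD s PySem.Set.empty).foldl (fun d nb => d.insert nb (d.getD nb 0 - 1)) st.2.2)

-- the 'while remaining' loop; fuel = |remaining| + 1 suffices: every round that recurses
-- removes at least one element of remaining (sources is a nonempty sublist of it)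
def pvKahnLoop (movie_titles : List String) (locked : PySem.Dict Int (PySem.Set Int)) :
    Nat → List Int → PySem.Set Int → PySem.Dict Int Int → List Int
  | 0, ranking, _, _ => ranking
  | fuel + 1, ranking, remaining, in_degree =>
    if remaining.isEmpty then ranking
    else
      let sources := remaining.filter (fun i => in_degree.getD i 0 == 0)
      if sources.isEmpty then
        ranking ++ PySem.List.sorted remaining (fun i => PySem.List.pyGetD movie_titles i "") false
      else
        let sources := PySem.List.sorted sources (fun i => PySem.List.pyGetD movie_titles i "") false
        let st := sources.foldl (pvKahnStep locked) (ranking, remaining, in_degree)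
        pvKahnLoop movie_titles locked fuel st.1 st.2.1 st.2.2

-- in_degree build + topological sort of A
def pvTopo (n : Int) (movie_titles : List String) (locked : PySem.Dict Int (PySem.Set Int)) : List Int :=
  let in0 : PySem.Dict Int Int := (PySem.List.pyRange 0 n 1).foldl (fun d i => d.insert i 0) PySem.Dict.empty
  let in_degree := locked.items.foldl (fun d kv => kv.2.foldl (fun d l => d.insert l (d.getD l 0 + 1)) d) in0
  let remaining := PySem.Set.ofList (PySem.List.pyRange 0 n 1)
  pvKahnLoop movie_titles locked (remaining.length + 1) [] remaining in_degree

-- A-side helpers: the stack-based DFS 'would_create_cycle'.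
-- Python's while loop has no fuel; pvFuel is an upper bound on its number of iterations
-- (≤ 1 + total pushes ≤ #distinct nodes * (total adjacency size + 1); the 0 case of
-- pvWcc is never reached — see pvWcc_eq_iff below).
def pvAdjSum (L : PySem.Dict Int (PySem.Set Int)) : Nat :=
  (L.items.map (fun kv => kv.2.length)).sum

def pvNodes (L : PySem.Dict Int (PySem.Set Int)) (l : Int) : List Int :=
  l :: L.items.flatMap (fun kv => kv.1 :: kv.2)

def pvFuel (L : PySem.Dict Int (PySem.Set Int)) (l : Int) : Nat :=
  (pvNodes L l).dedup.length * (pvAdjSum L + 1) + 1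

-- stack.pop() pops from the END of the list (getLast? / dropLast)
def pvWcc (locked : PySem.Dict Int (PySem.Set Int)) (winner : Int) :
    Nat → List Int → PySem.Set Int → Bool
  | 0, _, _ => false
  | fuel + 1, stack, visited =>
    match stack.getLast? with
    | none => false
    | some current =>
      let rest := stack.dropLast
      if current = winner then true
      else if current ∈ visited then pvWcc locked winner fuel rest visited
      else pvWcc locked winner fuel (rest ++ locked.getD current PySem.Set.empty)
            (PySem.Set.add visited current)

def compute_ranked_pairs (movie_ids : List Int) (movie_titles : List String) (matrix : List (List Int)) : List Int × (List (Int × List Int)) :=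
  let n : Int := movie_ids.length
  let pairs := pvCollectPairs n matrix
  let pairs := PySem.List.sorted pairs (fun x => toLex (-x.2.2.1, -x.2.2.2)) false
  let locked := pairs.foldl (fun locked p =>
      if pvWcc locked p.1 (pvFuel locked p.2.1) [p.2.1] PySem.Set.empty then locked
      else locked.insert p.1 (PySem.Set.add (locked.getD p.1 PySem.Set.empty) p.2.1))
    PySem.Dict.empty
  (pvTopo n movie_titles locked, locked.items)

-- ===== PORT B =====
-- B's '_pair' helper: the directed pair of one matchup as a (possibly empty) list
def pvPair (i j vi vj : Int) : List (Int × Int × Int × Int) :=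
  if vj < vi then [(i, j, vi - vj, vi)]
  else if vi < vj then [(j, i, vj - vi, vj)]
  else []

-- B's flat comprehension '[p for i in range(n) for j in range(i+1, n) for p in _pair(...)]'
def pvCollectPairsB (n : Int) (matrix : List (List Int)) : List (Int × Int × Int × Int) :=
  (PySem.List.pyRange 0 n 1).flatMap (fun i =>
    (PySem.List.pyRange (i + 1) n 1).flatMap (fun j =>
      pvPair i j (PySem.List.pyGetD (PySem.List.pyGetD matrix i []) j 0)
        (PySem.List.pyGetD (PySem.List.pyGetD matrix j []) i 0)))

-- B's 'while remaining' loop: in-degrees of the remaining nodes recomputed from the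
-- locked edges each round; remaining is an ordered list, filtered as a batch
def pvTopoLoopB (movie_titles : List String) (locked : PySem.Dict Int (PySem.Set Int)) :
    Nat → List Int → List Int → List Int
  | 0, ranking, _ => ranking
  | fuel + 1, ranking, remaining =>
    if remaining.isEmpty then ranking
    else
      let sources := PySem.List.sorted
        (remaining.filter (fun i =>
          ((remaining.countP (fun w => decide (i ∈ locked.getD w PySem.Set.empty)) : Int) == 0)))
        (fun i => PySem.List.pyGetD movie_titles i "") false
      if sources.isEmpty then
        ranking ++ PySem.List.sorted remaining (fun i => PySem.List.pyGetD movie_titles i "") false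
      else
        pvTopoLoopB movie_titles locked fuel (ranking ++ sources)
          (remaining.filter (fun i => !sources.contains i))

def pvTopoB (n : Int) (movie_titles : List String) (locked : PySem.Dict Int (PySem.Set Int)) : List Int :=
  pvTopoLoopB movie_titles locked ((PySem.List.pyRange 0 n 1).length + 1) [] (PySem.List.pyRange 0 n 1)

def compute_ranked_pairs_alt (movie_ids : List Int) (movie_titles : List String) (matrix : List (List Int)) : List Int × (List (Int × List Int)) :=
  let n : Int := movie_ids.length
  let pairs := PySem.List.sorted (pvCollectPairsB n matrix) (fun x => toLex (-x.2.2.1, -x.2.2.2)) false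
  -- state: (locked, reach); reach[loser] is in range (loser < n), the getD default is unreachable
  let st := pairs.foldl (fun st p =>
      let gained := (PySem.List.pyGet? st.2 p.2.1).getD PySem.Set.empty
      if p.1 ∉ gained then
        (PySem.Dict.modify st.1 p.1 PySem.Set.empty (fun s => PySem.Set.add s p.2.1),
         st.2.map (fun r => if p.1 ∈ r then PySem.Set.union r gained else r))
      else st)
    ((PySem.Dict.empty : PySem.Dict Int (PySem.Set Int)),
     (PySem.List.pyRange 0 n 1).map (fun i => PySem.Set.ofList [i]))
  (pvTopoB n movie_titles st.1, st.1.items)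

-- ===== PRECONDITION & SPEC =====
-- Pre_ excludes exactly the inputs on which the Python raises IndexError: a matrix cell
-- matrix[i][j] (i < j < n) that is missing, or fewer than n = len(movie_ids) titles
-- (every index 0..n-1 is passed to the sort key movie_titles[i]).
def Pre_compute_ranked_pairs (movie_ids : List Int) (movie_titles : List String) (matrix : List (List Int)) : Prop :=
  movie_ids.length ≤ movie_titles.length ∧
  ∀ i, i < movie_ids.length → ∀ j, j < movie_ids.length → i < j →
    j < (matrix.getD i []).length ∧ i < (matrix.getD j []).length
instance (movie_ids : List Int) (movie_titles : List String) (matrix : List (List Int)) : Decidable (Pre_compute_ranked_pairs movie_ids movie_titles matrix) := by unfold Pre_compute_ranked_pairs; infer_instance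

def pvWitness_compute_ranked_pairs : List Int × List String × List (List Int) :=
  ([100, 101], ["b", "a"], [[0, 3], [1, 0]])

def Spec_compute_ranked_pairs (movie_ids : List Int) (movie_titles : List String) (matrix : List (List Int)) (out : List Int × (List (Int × List Int))) : Prop := out = compute_ranked_pairs_alt movie_ids movie_titles matrix
instance (movie_ids : List Int) (movie_titles : List String) (matrix : List (List Int)) (out : List Int × (List (Int × List Int))) : Decidable (Spec_compute_ranked_pairs movie_ids movie_titles matrix out) := by unfold Spec_compute_ranked_pairs; infer_instance

-- ===== CLAIM (what is proved, stated in full; the proofs are below) =====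
def Claim_equal_compute_ranked_pairs : Prop := ∀ (movie_ids : List Int) (movie_titles : List String) (matrix : List (List Int)), Dom_compute_ranked_pairs movie_ids movie_titles matrix → Pre_compute_ranked_pairs movie_ids movie_titles matrix → Spec_compute_ranked_pairs movie_ids movie_titles matrix (compute_ranked_pairs movie_ids movie_titles matrix)

-- ===== LEMMAS AND PROOFS =====

-- ---- stage 1: pair collection ----
lemma pvCollect_eq (n : Int) (matrix : List (List Int)) :
    pvCollectPairs n matrix = pvCollectPairsB n matrix := by
  unfold pvCollectPairs pvCollectPairsB
  have hinner : ∀ (i : Int) (acc : List (Int × Int × Int × Int)),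
      (PySem.List.pyRange (i + 1) n 1).foldl (fun pairs j =>
        let votes_i := PySem.List.pyGetD (PySem.List.pyGetD matrix i []) j 0
        let votes_j := PySem.List.pyGetD (PySem.List.pyGetD matrix j []) i 0
        if votes_j < votes_i then pairs ++ [(i, j, votes_i - votes_j, votes_i)]
        else if votes_i < votes_j then pairs ++ [(j, i, votes_j - votes_i, votes_j)]
        else pairs) acc
      = acc ++ (PySem.List.pyRange (i + 1) n 1).flatMap (fun j =>
          pvPair i j (PySem.List.pyGetD (PySem.List.pyGetD matrix i []) j 0)
            (PySem.List.pyGetD (PySem.List.pyGetD matrix j []) i 0)) := by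
    intro i acc
    rw [show (fun (pairs : List (Int × Int × Int × Int)) j =>
        let votes_i := PySem.List.pyGetD (PySem.List.pyGetD matrix i []) j 0
        let votes_j := PySem.List.pyGetD (PySem.List.pyGetD matrix j []) i 0
        if votes_j < votes_i then pairs ++ [(i, j, votes_i - votes_j, votes_i)]
        else if votes_i < votes_j then pairs ++ [(j, i, votes_j - votes_i, votes_j)]
        else pairs)
      = (fun pairs j => pairs ++ pvPair i j
          (PySem.List.pyGetD (PySem.List.pyGetD matrix i []) j 0)
          (PySem.List.pyGetD (PySem.List.pyGetD matrix j []) i 0)) from by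
        funext pairs j
        simp only [pvPair]
        split_ifs <;> simp]
    exact PySem.List.foldl_append_eq_flatMap _ _ _
  rw [show (fun (pairs : List (Int × Int × Int × Int)) i =>
      (PySem.List.pyRange (i + 1) n 1).foldl (fun pairs j =>
        let votes_i := PySem.List.pyGetD (PySem.List.pyGetD matrix i []) j 0
        let votes_j := PySem.List.pyGetD (PySem.List.pyGetD matrix j []) i 0
        if votes_j < votes_i then pairs ++ [(i, j, votes_i - votes_j, votes_i)]
        else if votes_i < votes_j then pairs ++ [(j, i, votes_j - votes_i, votes_j)]
        else pairs) pairs)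
    = (fun pairs i => pairs ++ (PySem.List.pyRange (i + 1) n 1).flatMap (fun j =>
        pvPair i j (PySem.List.pyGetD (PySem.List.pyGetD matrix i []) j 0)
          (PySem.List.pyGetD (PySem.List.pyGetD matrix j []) i 0))) from by
      funext pairs i; exact hinner i pairs]
  rw [PySem.List.foldl_append_eq_flatMap]
  simp

-- ---- stage 2: the locking loop (DFS vs maintained closure) ----
-- the locked graph: an edge x → y for every y in locked[x]
def pvEdge (L : PySem.Dict Int (PySem.Set Int)) (x y : Int) : Prop :=
  y ∈ L.getD x PySem.Set.empty

def pvReach (L : PySem.Dict Int (PySem.Set Int)) : Int → Int → Prop :=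
  Relation.ReflTransGen (pvEdge L)

lemma pvAdj_le (L : PySem.Dict Int (PySem.Set Int)) (k : Int) :
    (L.getD k PySem.Set.empty).length ≤ pvAdjSum L := by
  cases h : L.get? k with
  | none => rw [PySem.Dict.getD_of_get?_eq_none _ _ h]; simp [PySem.Set.empty]
  | some v =>
    rw [PySem.Dict.getD_of_get?_eq_some _ _ h]
    have hmem := PySem.Dict.mem_items_of_get?_eq_some _ h
    exact List.single_le_sum (fun x _ => Nat.zero_le x) _
      (List.mem_map_of_mem hmem)

lemma pvEdge_mem_nodes (L : PySem.Dict Int (PySem.Set Int)) (l x y : Int)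
    (h : pvEdge L x y) : y ∈ pvNodes L l := by
  unfold pvEdge at h
  cases hg : L.get? x with
  | none =>
    rw [PySem.Dict.getD_of_get?_eq_none _ _ hg] at h
    simp [PySem.Set.empty] at h
  | some v =>
    rw [PySem.Dict.getD_of_get?_eq_some _ _ hg] at h
    have hmem := PySem.Dict.mem_items_of_get?_eq_some _ hg
    exact List.mem_cons_of_mem _ (List.mem_flatMap.2 ⟨(x, v), hmem, by simp [h]⟩)

-- DFS "escape" lemma: from a visited node that reaches w, some stack node reaches w
lemma pvEscape (L : PySem.Dict Int (PySem.Set Int)) (w : Int)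
    (V : PySem.Set Int) (S : List Int)
    (hI2 : ∀ v ∈ V, ∀ y, pvEdge L v y → y ∈ V ∨ y ∈ S) (hw : w ∉ V) :
    ∀ v, pvReach L v w → v ∈ V → ∃ x ∈ S, x ∉ V ∧ pvReach L x w := by
  intro v h
  induction h using Relation.ReflTransGen.head_induction_on with
  | refl => intro hv; exact absurd hv hw
  | @head a c h' hr ih =>
    intro hv
    rcases hI2 a hv c h' with hc | hc
    · exact ih hc
    · by_cases hcv : c ∈ V
      · exact ih hcv
      · exact ⟨c, hc, hcv, hr⟩

-- the DFS characterization: with enough fuel, pvWcc is reachability from the stack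
lemma pvWcc_eq_iff (L : PySem.Dict Int (PySem.Set Int)) (w : Int) (univ : Finset Int)
    (hadj : ∀ x y, pvEdge L x y → y ∈ univ) :
    ∀ (fuel : Nat) (stack : List Int) (visited : PySem.Set Int),
      (∀ x ∈ stack, x ∈ univ) → w ∉ visited →
      (∀ v ∈ visited, ∀ y, pvEdge L v y → y ∈ visited ∨ y ∈ stack) →
      (univ \ visited.toFinset).card * (pvAdjSum L + 1) + stack.length ≤ fuel →
      (pvWcc L w fuel stack visited = true ↔ ∃ x ∈ stack, pvReach L x w) := by
  intro fuel
  induction fuel with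
  | zero =>
    intro stack visited _ _ _ hfuel
    have hnil : stack = [] := by
      cases stack with
      | nil => rfl
      | cons a t => simp at hfuel
    subst hnil
    simp [pvWcc]
  | succ fuel ih =>
    intro stack visited hstack hw hI2 hfuel
    rcases List.eq_nil_or_concat stack with hnil | ⟨rest, current, hsc⟩
    · subst hnil
      simp [pvWcc]
    · rw [List.concat_eq_append] at hsc
      subst hsc
      have hunf : pvWcc L w (fuel + 1) (rest ++ [current]) visited =
          (if current = w then true
           else if current ∈ visited then pvWcc L w fuel rest visited
           else pvWcc L w fuel (rest ++ L.getD current PySem.Set.empty)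
             (PySem.Set.add visited current)) := by
        simp [pvWcc]
      rw [hunf]
      have hlenc : (rest ++ [current]).length = rest.length + 1 := by simp
      by_cases hcw : current = w
      · rw [if_pos hcw]
        exact iff_of_true rfl ⟨current, by simp, hcw ▸ Relation.ReflTransGen.refl⟩
      · rw [if_neg hcw]
        by_cases hcv : current ∈ visited
        · rw [if_pos hcv]
          have hrec := ih rest visited
            (fun x hx => hstack x (by simp [hx]))
            hw
            (fun v hv y hy => by
              rcases hI2 v hv y hy with h | h
              · exact Or.inl h
              · rcases List.mem_append.1 h with h | h
                · exact Or.inr h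
                · simp at h; exact Or.inl (h ▸ hcv))
            (by rw [hlenc] at hfuel; omega)
          rw [hrec]
          constructor
          · rintro ⟨x, hx, hxr⟩
            exact ⟨x, by simp [hx], hxr⟩
          · rintro ⟨x, hx, hxr⟩
            rcases List.mem_append.1 hx with h | h
            · exact ⟨x, h, hxr⟩
            · simp at h
              obtain ⟨z, hz, hznv, hzr⟩ := pvEscape L w visited (rest ++ [current]) hI2 hw current (h ▸ hxr) hcv
              rcases List.mem_append.1 hz with h | h
              · exact ⟨z, h, hzr⟩
              · simp at h; exact absurd (h ▸ hcv) hznv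
        · rw [if_neg hcv]
          have hcu : current ∈ univ := hstack current (by simp)
          have htf : (PySem.Set.add visited current).toFinset = insert current visited.toFinset := by
            rw [PySem.Set.add_of_not_mem hcv]
            simp [List.toFinset_append]
          have hcmem : current ∈ univ \ visited.toFinset := by
            simp [Finset.mem_sdiff, hcu, List.mem_toFinset, hcv]
          have hcard : (univ \ (PySem.Set.add visited current).toFinset).card
              = (univ \ visited.toFinset).card - 1 := by
            rw [htf, Finset.sdiff_insert, Finset.card_erase_of_mem hcmem]
          have hCpos : 1 ≤ (univ \ visited.toFinset).card := Finset.card_pos.2 ⟨current, hcmem⟩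
          have hrec := ih (rest ++ L.getD current PySem.Set.empty) (PySem.Set.add visited current)
            (fun x hx => by
              rcases List.mem_append.1 hx with h | h
              · exact hstack x (by simp [h])
              · exact hadj current x h)
            (by rw [PySem.Set.mem_add]; rintro (h | h); exact hw h; exact hcw h.symm)
            (fun v hv y hy => by
              rcases (PySem.Set.mem_add visited current v).1 hv with h | h
              · rcases hI2 v h y hy with h2 | h2
                · exact Or.inl ((PySem.Set.mem_add _ _ _).2 (Or.inl h2))
                · rcases List.mem_append.1 h2 with h3 | h3
                  · exact Or.inr (List.mem_append.2 (Or.inl h3))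
                  · simp at h3; exact Or.inl ((PySem.Set.mem_add _ _ _).2 (Or.inr h3))
              · subst h
                exact Or.inr (List.mem_append.2 (Or.inr hy)))
            (by
              rw [hcard]
              have hE := pvAdj_le L current
              rw [hlenc] at hfuel
              have hkey : ((univ \ visited.toFinset).card - 1) * (pvAdjSum L + 1)
                  = (univ \ visited.toFinset).card * (pvAdjSum L + 1) - (pvAdjSum L + 1) := by
                rw [Nat.sub_one_mul]
              have hge : pvAdjSum L + 1 ≤ (univ \ visited.toFinset).card * (pvAdjSum L + 1) :=
                Nat.le_mul_of_pos_left _ hCpos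
              simp only [List.length_append]
              omega)
          rw [hrec]
          constructor
          · rintro ⟨x, hx, hxr⟩
            rcases List.mem_append.1 hx with h | h
            · exact ⟨x, by simp [h], hxr⟩
            · exact ⟨current, by simp, Relation.ReflTransGen.head h hxr⟩
          · rintro ⟨x, hx, hxr⟩
            rcases List.mem_append.1 hx with h | h
            · exact ⟨x, List.mem_append.2 (Or.inl h), hxr⟩
            · simp at h
              subst h
              rcases Relation.ReflTransGen.cases_head hxr with h | ⟨b, hb, hbr⟩
              · exact absurd h hcw
              · exact ⟨b, List.mem_append.2 (Or.inr hb), hbr⟩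

lemma pvWcc_iff (L : PySem.Dict Int (PySem.Set Int)) (w l : Int) :
    (pvWcc L w (pvFuel L l) [l] PySem.Set.empty = true) ↔ pvReach L l w := by
  have h := pvWcc_eq_iff L w (pvNodes L l).toFinset
    (fun x y hxy => List.mem_toFinset.2 (pvEdge_mem_nodes L l x y hxy))
    (pvFuel L l) [l] PySem.Set.empty
    (fun x hx => by simp at hx; subst hx; exact List.mem_toFinset.2 (by simp [pvNodes]))
    (by simp [PySem.Set.empty])
    (fun v hv => by simp [PySem.Set.empty] at hv)
    (by
      have : (PySem.Set.empty : PySem.Set Int).toFinset = ∅ := by simp [PySem.Set.empty]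
      rw [this, Finset.sdiff_empty, List.card_toFinset]
      simp [pvFuel])
  simpa using h

lemma pvEdge_insert (L : PySem.Dict Int (PySem.Set Int)) (w l x y : Int) :
    pvEdge (L.insert w (PySem.Set.add (L.getD w PySem.Set.empty) l)) x y ↔
      pvEdge L x y ∨ (x = w ∧ y = l) := by
  unfold pvEdge
  rw [PySem.Dict.getD_insert]
  by_cases hx : x = w
  · subst hx
    rw [if_pos rfl, PySem.Set.mem_add]
    tauto
  · rw [if_neg hx]
    tauto

lemma pvReach_insert (L : PySem.Dict Int (PySem.Set Int)) (w l a b : Int) :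
    pvReach (L.insert w (PySem.Set.add (L.getD w PySem.Set.empty) l)) a b ↔
      pvReach L a b ∨ (pvReach L a w ∧ pvReach L l b) := by
  constructor
  · intro h
    induction h with
    | refl => exact Or.inl Relation.ReflTransGen.refl
    | tail _ e ih =>
      rename_i m c _
      rcases (pvEdge_insert L w l m c).1 e with he | ⟨hmw, hcl⟩
      · rcases ih with h1 | ⟨h1, h2⟩
        · exact Or.inl (h1.tail he)
        · exact Or.inr ⟨h1, h2.tail he⟩
      · rcases ih with h1 | ⟨h1, _⟩ <;>
          exact Or.inr ⟨hmw ▸ h1, hcl ▸ Relation.ReflTransGen.refl⟩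
  · intro h
    have mono : ∀ p q : Int, pvReach L p q →
        pvReach (L.insert w (PySem.Set.add (L.getD w PySem.Set.empty) l)) p q :=
      fun p q hp => Relation.ReflTransGen.mono
        (fun x y hxy => (pvEdge_insert L w l x y).2 (Or.inl hxy)) hp
    rcases h with h | ⟨h1, h2⟩
    · exact mono _ _ h
    · exact (mono _ _ h1).trans
        (Relation.ReflTransGen.head ((pvEdge_insert L w l w l).2 (Or.inr ⟨rfl, rfl⟩)) (mono _ _ h2))

lemma pvReach_empty (a b : Int) : pvReach PySem.Dict.empty a b ↔ b = a := by
  apply Relation.reflTransGen_iff_eq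
  intro c h
  unfold pvEdge at h
  rw [PySem.Dict.getD_empty] at h
  simp [PySem.Set.empty] at h

-- the invariant relating B's reach list to reachability in the locked graph
def pvInv (n : Int) (L : PySem.Dict Int (PySem.Set Int)) (reach : List (PySem.Set Int)) : Prop :=
  reach.length = n.toNat ∧
  ∀ p y : Int, 0 ≤ p → p < n →
    (y ∈ (PySem.List.pyGet? reach p).getD PySem.Set.empty ↔ pvReach L p y)

lemma pvInv_init (n : Int) :
    pvInv n PySem.Dict.empty ((PySem.List.pyRange 0 n 1).map (fun i => PySem.Set.ofList [i])) := by
  constructor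
  · simp [PySem.List.length_pyRange_one]
  · intro p y hp0 hpn
    have hn0 : 0 ≤ n := le_of_lt (lt_of_le_of_lt hp0 hpn)
    have hn : n = (n.toNat : Int) := (Int.toNat_of_nonneg hn0).symm
    have hp : p = (p.toNat : Int) := (Int.toNat_of_nonneg hp0).symm
    rw [PySem.List.pyGet?_of_nonneg _ hp0, hn,
      PySem.List.getElem?_map_pyRange_zero (fun i => PySem.Set.ofList [i]) n.toNat p.toNat (by omega)]
    rw [pvReach_empty]
    simp [PySem.Set.ofList]
    omega

lemma pvInv_step (n : Int) (L : PySem.Dict Int (PySem.Set Int)) (reach : List (PySem.Set Int))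
    (w l : Int) (hInv : pvInv n L reach) (hl0 : 0 ≤ l) (hln : l < n) :
    pvInv n (L.insert w (PySem.Set.add (L.getD w PySem.Set.empty) l))
      (reach.map (fun r => if w ∈ r then
        PySem.Set.union r ((PySem.List.pyGet? reach l).getD PySem.Set.empty) else r)) := by
  obtain ⟨hlen, hmem⟩ := hInv
  refine ⟨by simpa using hlen, ?_⟩
  intro p y hp0 hpn
  have hplen : p.toNat < reach.length := by
    rw [hlen]; omega
  have hgetp : (PySem.List.pyGet? reach p).getD PySem.Set.empty = reach[p.toNat] := by
    rw [PySem.List.pyGet?_of_nonneg _ hp0, List.getElem?_eq_getElem hplen]; rfl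
  have hAt : (PySem.List.pyGet? (reach.map (fun r => if w ∈ r then
        PySem.Set.union r ((PySem.List.pyGet? reach l).getD PySem.Set.empty) else r)) p).getD
        PySem.Set.empty
      = (if w ∈ reach[p.toNat] then
          PySem.Set.union reach[p.toNat] ((PySem.List.pyGet? reach l).getD PySem.Set.empty)
         else reach[p.toNat]) := by
    rw [PySem.List.pyGet?_of_nonneg _ hp0, List.getElem?_map, List.getElem?_eq_getElem hplen]
    rfl
  rw [hAt, pvReach_insert]
  have hp' := hmem p y hp0 hpn
  rw [hgetp] at hp'
  have hpw := hmem p w hp0 hpn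
  rw [hgetp] at hpw
  have hl' := hmem l y hl0 hln
  by_cases hw : w ∈ reach[p.toNat]
  · rw [if_pos hw, PySem.Set.mem_union]
    rw [hp', hl']
    have : pvReach L p w := hpw.1 hw
    tauto
  · rw [if_neg hw, hp']
    have : ¬ pvReach L p w := fun h => hw (hpw.2 h)
    tauto

lemma pvFoldl_mem {α β : Type} (P : β → Prop) (l : List α) (f : List β → α → List β)
    (hstep : ∀ acc x, x ∈ l → (∀ b ∈ acc, P b) → ∀ b ∈ f acc x, P b) :
    ∀ init, (∀ b ∈ init, P b) → ∀ b ∈ l.foldl f init, P b := by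
  induction l with
  | nil => intro init h; simpa
  | cons a t ih =>
    intro init h
    exact ih (fun acc x hx => hstep acc x (List.mem_cons_of_mem _ hx)) (f init a)
      (hstep init a (List.mem_cons_self) h)

lemma pvCollectPairs_bounds (n : Int) (matrix : List (List Int)) :
    ∀ p ∈ pvCollectPairs n matrix, (0 ≤ p.1 ∧ p.1 < n) ∧ (0 ≤ p.2.1 ∧ p.2.1 < n) := by
  unfold pvCollectPairs
  refine pvFoldl_mem (fun p : Int × Int × Int × Int =>
    (0 ≤ p.1 ∧ p.1 < n) ∧ (0 ≤ p.2.1 ∧ p.2.1 < n)) _ _ ?_ [] (by simp)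
  intro acc i hi hacc
  have hi' := PySem.List.mem_pyRange_one.1 hi
  refine pvFoldl_mem (fun p : Int × Int × Int × Int =>
    (0 ≤ p.1 ∧ p.1 < n) ∧ (0 ≤ p.2.1 ∧ p.2.1 < n)) _ _ ?_ acc hacc
  intro acc2 j hj hacc2 b hb
  have hj' := PySem.List.mem_pyRange_one.1 hj
  dsimp only at hb
  split_ifs at hb with h1 h2 <;>
    [rcases List.mem_append.1 hb with h | h;
     rcases List.mem_append.1 hb with h | h;
     exact hacc2 b hb]
  · exact hacc2 b h
  · simp at h; subst h; dsimp; omega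
  · exact hacc2 b h
  · simp at h; subst h; dsimp; omega

lemma pvLock_eq (n : Int) (ps : List (Int × Int × Int × Int))
    (hb : ∀ p ∈ ps, 0 ≤ p.2.1 ∧ p.2.1 < n) :
    ∀ (L : PySem.Dict Int (PySem.Set Int)) (reach : List (PySem.Set Int)), pvInv n L reach →
      (ps.foldl (fun st p =>
          let gained := (PySem.List.pyGet? st.2 p.2.1).getD PySem.Set.empty
          if p.1 ∉ gained then
            (PySem.Dict.modify st.1 p.1 PySem.Set.empty (fun s => PySem.Set.add s p.2.1),
             st.2.map (fun r => if p.1 ∈ r then PySem.Set.union r gained else r))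
          else st) (L, reach)).1
       = ps.foldl (fun locked p =>
          if pvWcc locked p.1 (pvFuel locked p.2.1) [p.2.1] PySem.Set.empty then locked
          else locked.insert p.1 (PySem.Set.add (locked.getD p.1 PySem.Set.empty) p.2.1)) L := by
  induction ps with
  | nil => intro L reach _; rfl
  | cons p t ih =>
    intro L reach hInv
    obtain ⟨hl0, hln⟩ := hb p (List.mem_cons_self)
    have htest : (p.1 ∈ (PySem.List.pyGet? reach p.2.1).getD PySem.Set.empty) ↔ pvReach L p.2.1 p.1 :=
      hInv.2 p.2.1 p.1 hl0 hln
    have hwcc := pvWcc_iff L p.1 p.2.1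
    have hbt : ∀ q ∈ t, 0 ≤ q.2.1 ∧ q.2.1 < n := fun q hq => hb q (List.mem_cons_of_mem _ hq)
    simp only [List.foldl_cons]
    by_cases hc : pvReach L p.2.1 p.1
    · rw [if_neg (by simp only [Decidable.not_not]; exact htest.2 hc),
        if_pos (hwcc.2 hc)]
      exact ih hbt L reach hInv
    · rw [if_pos (fun hmem => hc (htest.1 hmem)),
        if_neg (by rw [hwcc]; exact hc)]
      exact ih hbt _ _ (pvInv_step n L reach p.1 p.2.1 hInv hl0 hln)

-- ---- stage 3: facts about the final locked dict ----
def pvLockedOK (n : Int) (d : PySem.Dict Int (PySem.Set Int)) : Prop :=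
  d.keys.Nodup ∧ (∀ k ∈ d.keys, 0 ≤ k ∧ k < n) ∧ (∀ kv ∈ d.items, kv.2.Nodup)

lemma pvKeys_insert (d : PySem.Dict Int (PySem.Set Int)) (k : Int) (v : PySem.Set Int) :
    (d.insert k v).keys = if d.contains k then d.keys else d.keys ++ [k] := by
  by_cases h : d.contains k
  · simp only [PySem.Dict.insert, h, if_true, PySem.Dict.keys, List.map_map]
    exact List.map_congr_left (fun p _ => by by_cases hpk : p.1 = k <;> simp [hpk])
  · simp [PySem.Dict.insert, h, PySem.Dict.keys]

lemma pvMem_keys_iff_contains (d : PySem.Dict Int (PySem.Set Int)) (k : Int) :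
    k ∈ d.keys ↔ d.contains k = true := by
  simp only [PySem.Dict.keys, PySem.Dict.contains, List.any_eq_true, List.mem_map, beq_iff_eq]

lemma pvItems_insert_nodup (d : PySem.Dict Int (PySem.Set Int)) (k : Int) (v : PySem.Set Int)
    (hv : v.Nodup) (h : ∀ kv ∈ d.items, kv.2.Nodup) :
    ∀ kv ∈ (d.insert k v).items, kv.2.Nodup := by
  intro kv hkv
  simp only [PySem.Dict.insert] at hkv
  split at hkv
  · simp only [List.mem_map] at hkv
    obtain ⟨p, hp, rfl⟩ := hkv
    by_cases hpk : p.1 = k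
    · simp only [hpk, beq_self_eq_true, if_true]; exact hv
    · simp only [beq_iff_eq, hpk, if_false]; exact h p hp
  · rcases List.mem_append.1 hkv with h' | h'
    · exact h kv h'
    · simp at h'; subst h'; exact hv

lemma pvGetD_nodup (d : PySem.Dict Int (PySem.Set Int)) (h : ∀ kv ∈ d.items, kv.2.Nodup)
    (w : Int) : (d.getD w PySem.Set.empty).Nodup := by
  cases hg : d.get? w with
  | none => rw [PySem.Dict.getD_of_get?_eq_none _ _ hg]; simp [PySem.Set.empty]
  | some v =>
    rw [PySem.Dict.getD_of_get?_eq_some _ _ hg]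
    exact h (w, v) (PySem.Dict.mem_items_of_get?_eq_some _ hg)

lemma pvFoldl_inv {α β : Type} (P : β → Prop) (f : β → α → β) (l : List α)
    (hstep : ∀ b a, a ∈ l → P b → P (f b a)) : ∀ b, P b → P (l.foldl f b) := by
  induction l with
  | nil => intro b h; exact h
  | cons a t ih =>
    intro b h
    exact ih (fun b' a' ha' => hstep b' a' (List.mem_cons_of_mem _ ha')) _
      (hstep b a List.mem_cons_self h)

lemma pvLockedOK_final (n : Int) (ps : List (Int × Int × Int × Int))
    (hb : ∀ p ∈ ps, 0 ≤ p.1 ∧ p.1 < n) :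
    pvLockedOK n (ps.foldl (fun locked p =>
      if pvWcc locked p.1 (pvFuel locked p.2.1) [p.2.1] PySem.Set.empty then locked
      else locked.insert p.1 (PySem.Set.add (locked.getD p.1 PySem.Set.empty) p.2.1))
      PySem.Dict.empty) := by
  refine pvFoldl_inv (pvLockedOK n) _ ps ?_ _ ?_
  · intro d p hp hOK
    obtain ⟨h1, h2, h3⟩ := hOK
    split
    · exact ⟨h1, h2, h3⟩
    · have hv : (PySem.Set.add (d.getD p.1 PySem.Set.empty) p.2.1).Nodup :=
        PySem.Set.nodup_add _ _ (pvGetD_nodup d h3 p.1)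
      refine ⟨?_, ?_, pvItems_insert_nodup d p.1 _ hv h3⟩
      · rw [pvKeys_insert]
        by_cases hc : d.contains p.1
        · simpa [hc] using h1
        · have hnk : p.1 ∉ d.keys := fun hk => hc ((pvMem_keys_iff_contains d p.1).1 hk)
          rw [if_neg hc]
          exact h1.append (List.nodup_singleton _) (by simpa [List.disjoint_singleton] using hnk)
      · intro k' hk'
        rcases (PySem.Dict.mem_keys_insert d p.1 k' _).1 hk' with rfl | hk'
        · exact hb p hp
        · exact h2 k' hk'
  · exact ⟨by simp [PySem.Dict.empty, PySem.Dict.keys],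
      fun k hk => by simp [PySem.Dict.empty, PySem.Dict.keys] at hk,
      fun kv hkv => by simp [PySem.Dict.empty] at hkv⟩

-- ---- stage 4: the in_degree dict vs per-round recomputation ----
lemma pvGetD_in0 (l : List Int) :
    ∀ (d : PySem.Dict Int Int), (∀ j, d.getD j 0 = 0) →
      ∀ j, (l.foldl (fun d i => d.insert i 0) d).getD j 0 = 0 := by
  induction l with
  | nil => intro d h j; exact h j
  | cons a t ih =>
    intro d h j
    refine ih _ (fun j' => ?_) j
    rw [PySem.Dict.getD_insert]
    split <;> [rfl; exact h j']

lemma pvGetD_bump_set (v : List Int) :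
    ∀ (d : PySem.Dict Int Int) (i : Int), v.Nodup →
      (v.foldl (fun d l => d.insert l (d.getD l 0 + 1)) d).getD i 0
        = d.getD i 0 + (if i ∈ v then 1 else 0) := by
  induction v with
  | nil => intro d i _; simp
  | cons a t ih =>
    intro d i hnd
    rw [List.foldl_cons, ih _ i hnd.of_cons, PySem.Dict.getD_insert]
    have hat : a ∉ t := (List.nodup_cons.1 hnd).1
    by_cases hia : i = a
    · subst hia
      simp [hat]
    · simp [hia, List.mem_cons]

lemma pvGetD_drop_set (v : List Int) :
    ∀ (d : PySem.Dict Int Int) (i : Int), v.Nodup →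
      (v.foldl (fun d nb => d.insert nb (d.getD nb 0 - 1)) d).getD i 0
        = d.getD i 0 - (if i ∈ v then 1 else 0) := by
  induction v with
  | nil => intro d i _; simp
  | cons a t ih =>
    intro d i hnd
    rw [List.foldl_cons, ih _ i hnd.of_cons, PySem.Dict.getD_insert]
    have hat : a ∉ t := (List.nodup_cons.1 hnd).1
    by_cases hia : i = a
    · subst hia
      simp [hat]
    · simp [hia, List.mem_cons]

lemma pvGetD_incr_items (its : List (Int × PySem.Set Int)) :
    ∀ (d : PySem.Dict Int Int) (i : Int), (∀ kv ∈ its, kv.2.Nodup) →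
      (its.foldl (fun d kv => kv.2.foldl (fun d l => d.insert l (d.getD l 0 + 1)) d) d).getD i 0
        = d.getD i 0 + (its.countP (fun kv => decide (i ∈ kv.2)) : Int) := by
  induction its with
  | nil => intro d i _; simp
  | cons kv t ih =>
    intro d i h
    rw [List.foldl_cons, ih _ i (fun kv' hkv' => h kv' (List.mem_cons_of_mem _ hkv')),
      pvGetD_bump_set kv.2 d i (h kv List.mem_cons_self), List.countP_cons]
    push_cast [apply_ite (fun n : Nat => (n : Int))]
    simp only [decide_eq_true_eq]
    split_ifs <;> omega

lemma pvGetD_decr (L : PySem.Dict Int (PySem.Set Int))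
    (hvals : ∀ w, (L.getD w PySem.Set.empty).Nodup) (ss : List Int) :
    ∀ (d : PySem.Dict Int Int) (i : Int),
      (ss.foldl (fun d s => (L.getD s PySem.Set.empty).foldl
          (fun d nb => d.insert nb (d.getD nb 0 - 1)) d) d).getD i 0
        = d.getD i 0 - (ss.countP (fun s => decide (i ∈ L.getD s PySem.Set.empty)) : Int) := by
  induction ss with
  | nil => intro d i; simp
  | cons s t ih =>
    intro d i
    rw [List.foldl_cons, ih _ i, pvGetD_drop_set _ d i (hvals s), List.countP_cons]
    push_cast [apply_ite (fun n : Nat => (n : Int))]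
    simp only [decide_eq_true_eq]
    split_ifs <;> omega

lemma pvCountP_keys (i : Int) :
    ∀ (its : List (Int × PySem.Set Int)) (L : List Int), L.Nodup → (its.map (·.1)).Nodup →
      (∀ kv ∈ its, kv.1 ∈ L) →
      L.countP (fun w => decide (i ∈ (PySem.Dict.mk its).getD w PySem.Set.empty))
        = its.countP (fun kv => decide (i ∈ kv.2)) := by
  intro its
  induction its with
  | nil =>
    intro L _ _ _
    simp [PySem.Dict.getD, PySem.Dict.get?, PySem.Set.empty]
  | cons kv rest ih =>
    intro L hL hkeys hmem
    obtain ⟨k, v⟩ := kv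
    have hkL : k ∈ L := hmem (k, v) List.mem_cons_self
    have hperm := List.perm_cons_erase hkL
    rw [hperm.countP_eq]
    rw [List.countP_cons]
    rw [List.map_cons] at hkeys
    obtain ⟨hknr, hkrest⟩ := List.nodup_cons.1 hkeys
    have herase : (L.erase k).countP
        (fun w => decide (i ∈ (PySem.Dict.mk ((k, v) :: rest)).getD w PySem.Set.empty))
        = (L.erase k).countP (fun w => decide (i ∈ (PySem.Dict.mk rest).getD w PySem.Set.empty)) := by
      refine List.countP_congr (fun w hw => ?_)
      have hwk : w ≠ k := (hL.mem_erase_iff.1 hw).1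
      have : (PySem.Dict.mk ((k, v) :: rest)).getD w PySem.Set.empty
          = (PySem.Dict.mk rest).getD w PySem.Set.empty := by
        unfold PySem.Dict.getD
        rw [PySem.Dict.get?_mk_cons]
        rw [if_neg (by simpa using fun e => hwk e.symm)]
      rw [this]
    have hrest := ih (L.erase k) (hL.erase k) hkrest
      (fun kv' hkv' => hL.mem_erase_iff.2
        ⟨fun e => hknr (e ▸ (List.mem_map_of_mem hkv' : kv'.1 ∈ rest.map (·.1))), hmem kv' (List.mem_cons_of_mem _ hkv')⟩)
    have hk : (PySem.Dict.mk ((k, v) :: rest)).getD k PySem.Set.empty = v := by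
      unfold PySem.Dict.getD
      rw [PySem.Dict.get?_mk_cons, if_pos (by simp)]
      rfl
    rw [List.countP_cons, herase, hrest, hk]

-- ---- stage 5: the Kahn loop vs the round-recomputation loop ----
lemma pvKahn_foldl (L : PySem.Dict Int (PySem.Set Int)) (ss : List Int) :
    ∀ (rk rem : List Int) (deg : PySem.Dict Int Int),
      ss.foldl (pvKahnStep L) (rk, rem, deg)
        = (rk ++ ss, ss.foldl PySem.Set.discard rem,
           ss.foldl (fun d s => (L.getD s PySem.Set.empty).foldl
             (fun d nb => d.insert nb (d.getD nb 0 - 1)) d) deg) := by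
  induction ss with
  | nil => intro rk rem deg; simp
  | cons s t ih =>
    intro rk rem deg
    rw [List.foldl_cons, List.foldl_cons, List.foldl_cons]
    rw [show pvKahnStep L (rk, rem, deg) s
      = (rk ++ [s], PySem.Set.discard rem s,
         (L.getD s PySem.Set.empty).foldl (fun d nb => d.insert nb (d.getD nb 0 - 1)) deg) from rfl]
    rw [ih]
    simp

lemma pvFoldl_discard (ss : List Int) :
    ∀ (rem : List Int), ss.foldl PySem.Set.discard rem
      = rem.filter (fun x => decide (x ∉ ss)) := by
  induction ss with
  | nil => intro rem; simp
  | cons s t ih =>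
    intro rem
    rw [List.foldl_cons, ih]
    rw [show PySem.Set.discard rem s = rem.filter (fun y => !(y == s)) from rfl]
    rw [List.filter_filter]
    refine List.filter_congr (fun x _ => ?_)
    by_cases h1 : x = s <;> by_cases h2 : x ∈ t <;> simp [h1, h2]

lemma pvCountP_filter_not (rem ss : List Int) (q : Int → Bool) (hrem : rem.Nodup)
    (hss : ss.Nodup) (hsub : ∀ x ∈ ss, x ∈ rem) :
    ((rem.filter (fun x => decide (x ∉ ss))).countP q : Int)
      = (rem.countP q : Int) - (ss.countP q : Int) := by
  have hperm := List.filter_append_perm (fun x => decide (x ∈ ss)) rem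
  have hsplit : rem.countP q
      = (rem.filter (fun x => decide (x ∈ ss))).countP q
        + (rem.filter (fun x => !decide (x ∈ ss))).countP q := by
    rw [← hperm.countP_eq q, List.countP_append]
  have hin : (rem.filter (fun x => decide (x ∈ ss))).countP q = ss.countP q := by
    refine (List.Perm.countP_eq q ?_)
    refine (List.perm_ext_iff_of_nodup (hrem.filter _) hss).2 (fun a => ?_)
    simp only [List.mem_filter, decide_eq_true_eq]
    exact ⟨fun h => h.2, fun h => ⟨hsub a h, h⟩⟩
  have hnot : rem.filter (fun x => !decide (x ∈ ss)) = rem.filter (fun x => decide (x ∉ ss)) := by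
    refine List.filter_congr (fun x _ => by by_cases h : x ∈ ss <;> simp [h])
  rw [← hnot]
  omega

lemma pvTopoLoop_eq (titles : List String) (L : PySem.Dict Int (PySem.Set Int))
    (hvals : ∀ w, (L.getD w PySem.Set.empty).Nodup) :
    ∀ (fuel : Nat) (rk rem : List Int) (deg : PySem.Dict Int Int), rem.Nodup →
      (∀ i, deg.getD i 0 = (rem.countP (fun w => decide (i ∈ L.getD w PySem.Set.empty)) : Int)) →
      pvKahnLoop titles L fuel rk rem deg = pvTopoLoopB titles L fuel rk rem := by
  intro fuel
  induction fuel with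
  | zero => intro rk rem deg _ _; rfl
  | succ fuel ih =>
    intro rk rem deg hnd hdeg
    simp only [pvKahnLoop, pvTopoLoopB]
    by_cases hre : rem.isEmpty
    · simp [hre]
    · simp only [hre, Bool.false_eq_true, if_false]
      have hSrc : rem.filter (fun i => deg.getD i 0 == 0)
          = rem.filter (fun i =>
              ((rem.countP (fun w => decide (i ∈ L.getD w PySem.Set.empty)) : Int) == 0)) :=
        List.filter_congr (fun i _ => by rw [hdeg i])
      rw [← hSrc]
      set s := rem.filter (fun i => deg.getD i 0 == 0) with hs
      set ss := PySem.List.sorted s (fun i => PySem.List.pyGetD titles i "") false with hss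
      have hEmp : ss.isEmpty = s.isEmpty := by
        by_cases h : s = []
        · simp [hss, h, PySem.List.sorted_eq_nil_iff]
        · have h2 : ss ≠ [] := fun e => h ((PySem.List.sorted_eq_nil_iff _ _ _).1 e)
          rw [List.isEmpty_eq_false_iff.mpr h2, List.isEmpty_eq_false_iff.mpr h]
      rw [hEmp]
      by_cases hse : s.isEmpty
      · simp [hse]
      · simp only [hse, Bool.false_eq_true, if_false]
        rw [pvKahn_foldl, pvFoldl_discard]
        have hssnd : ss.Nodup := (PySem.List.sorted_perm _ _ _).nodup_iff.2 (hnd.filter _)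
        have hsubss : ∀ x ∈ ss, x ∈ rem := fun x hx =>
          List.mem_of_mem_filter ((PySem.List.mem_sorted _ _ _ _).1 hx)
        have hfil : rem.filter (fun x => decide (x ∉ ss)) = rem.filter (fun i => !ss.contains i) :=
          List.filter_congr (fun x _ => by by_cases h : x ∈ ss <;> simp [h])
        rw [hfil]
        refine ih (rk ++ ss) _ _ (hnd.filter _) (fun i => ?_)
        rw [pvGetD_decr L hvals ss deg i, hdeg i, ← hfil,
          pvCountP_filter_not rem ss _ hnd hssnd hsubss]

lemma pvSet_ofList_nodup (l : List Int) (h : l.Nodup) : PySem.Set.ofList l = l := by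
  induction l with
  | nil => rfl
  | cons a t ih =>
    rw [PySem.Set.ofList_cons, ih (List.nodup_cons.1 h).2]
    have hat : a ∉ t := (List.nodup_cons.1 h).1
    rw [show PySem.Set.discard t a = t.filter (fun y => !(y == a)) from rfl]
    rw [List.filter_eq_self.2 (fun y hy => by simpa using ne_of_mem_of_not_mem hy hat)]

lemma pvTopo_eq (n : Int) (titles : List String) (L : PySem.Dict Int (PySem.Set Int))
    (hOK : pvLockedOK n L) : pvTopo n titles L = pvTopoB n titles L := by
  obtain ⟨hkeys, hbnd, hitems⟩ := hOK
  unfold pvTopo pvTopoB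
  simp only []
  rw [pvSet_ofList_nodup _ (PySem.List.nodup_pyRange_one 0 n)]
  refine pvTopoLoop_eq titles L (pvGetD_nodup L hitems) _ [] _ _
    (PySem.List.nodup_pyRange_one 0 n) (fun i => ?_)
  rw [pvGetD_incr_items L.items _ i hitems,
    pvGetD_in0 _ PySem.Dict.empty (fun j => PySem.Dict.getD_empty j 0) i]
  have hck : (PySem.List.pyRange 0 n 1).countP (fun w => decide (i ∈ L.getD w PySem.Set.empty))
      = L.items.countP (fun kv => decide (i ∈ kv.2)) :=
    pvCountP_keys i L.items (PySem.List.pyRange 0 n 1) (PySem.List.nodup_pyRange_one 0 n) hkeys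
      (fun kv hkv => PySem.List.mem_pyRange_one.2 (by
        have := hbnd kv.1 (List.mem_map_of_mem hkv)
        omega))
  rw [hck]
  ring

-- ===== VERDICT (by name: the statement is the Claim_ definition above) =====
theorem compute_ranked_pairs_spec : Claim_equal_compute_ranked_pairs := by
  intro movie_ids movie_titles matrix _ _
  unfold Spec_compute_ranked_pairs compute_ranked_pairs compute_ranked_pairs_alt
  simp only []
  rw [← pvCollect_eq]
  have hball := pvCollectPairs_bounds (movie_ids.length : Int) matrix
  have hb : ∀ p ∈ PySem.List.sorted (pvCollectPairs (movie_ids.length : Int) matrix)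
      (fun x => toLex (-x.2.2.1, -x.2.2.2)) false, 0 ≤ p.2.1 ∧ p.2.1 < (movie_ids.length : Int) :=
    fun p hp => (hball p ((PySem.List.mem_sorted _ _ _ _).1 hp)).2
  have hbw : ∀ p ∈ PySem.List.sorted (pvCollectPairs (movie_ids.length : Int) matrix)
      (fun x => toLex (-x.2.2.1, -x.2.2.2)) false, 0 ≤ p.1 ∧ p.1 < (movie_ids.length : Int) :=
    fun p hp => (hball p ((PySem.List.mem_sorted _ _ _ _).1 hp)).1
  have h := pvLock_eq (movie_ids.length : Int) _ hb PySem.Dict.empty _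
    (pvInv_init (movie_ids.length : Int))
  rw [← h]
  rw [pvTopo_eq _ _ _ (by
    have := pvLockedOK_final (movie_ids.length : Int) _ hbw
    rw [← h] at this
    exact this)]
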